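-- pv_equiv track=rewrite | github.com/dexherodex/KNUSE-20221-4-TeamFour | metric_counter.py | check_three_quotes
-- ===== SOURCE A (Python) =====
-- def check_three_quotes(stripped_line, quote, quote_open):
--     """ Check whether three quote comment is exist """
--     if not stripped_line:
--         return -1
--
--     compare_quote = ''
--     encase_quote = ''
--
--     if quote == '"':
--         compare_quote = '"'
--         encase_quote = "'"
--     elif quote == "'":
--         compare_quote = "'"
--         encase_quote = '"'
--
--     stack_open = []
--     stack_close = []
--     full = 3
--
--     is_encase_open = False
--     encase_stack = 0
--     encase_full = 2
--
--     paren_is_open = [False, False, False]  # List of whether parenthesis is open (0: (), 1: {}, 2: [])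
--
--     for item in stripped_line:
--         if item == '#' and not quote_open:
--             # when quotes are in hash(#) comment
--             return 0
--         if item == '=' and not quote_open:
--             # when quotes assign to some variable
--             return 0
--
--         # when quote is in parentheses
--         paren_is_open = check_paren(stripped_line, paren_is_open, quote_open, quote_open)
--
--         if not paren_is_open[0] and not paren_is_open[1] and not paren_is_open[2]:
--             if item == compare_quote:
--                 if len(stack_open) < full and len(stack_close) < full:
--                     stack_open.append(item)
--                 elif len(stack_open) == full:
--                     stack_close.append(item)
--                 else:
--                     continue
--             elif item == encase_quote:
--                 # if quotes are in the other quotes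
--                 # Example: '"""' or "'''"
--                 if not is_encase_open:
--                     encase_stack += 1
--                     is_encase_open = True
--                 elif is_encase_open:
--                     encase_stack += 1
--                     if encase_stack > encase_full:
--                         encase_stack = 0
--                         is_encase_open = False
--             else:
--                 if len(stack_open) != full:
--                     stack_open.clear()
--                 if len(stack_close) != full:
--                     stack_close.clear()
--
--     if len(stack_open) == full and len(stack_close) == full:
--         return 2  # a quote comment is open and close
--     elif len(stack_open) == full:
--         return 1  # a quote comment is just open or close
--     else:
--         return 0
--
-- def check_paren(stripped_line, paren_is_open, quote_is_open, double_quote_is_open):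
--     """ Check whether parentheses are open or close """
--     for item in stripped_line:
--         if item == '(' and not paren_is_open[0] and not quote_is_open and not double_quote_is_open:
--             paren_is_open[0] = True
--         elif item == ')' and paren_is_open[0]:
--             paren_is_open[0] = False
--         elif item == '{' and not paren_is_open[1] and not quote_is_open and not double_quote_is_open:
--             paren_is_open[1] = True
--         elif item == '}' and paren_is_open[1]:
--             paren_is_open[1] = False
--         elif item == '[' and not paren_is_open[2] and not quote_is_open and not double_quote_is_open:
--             paren_is_open[2] = True
--         elif item == ']' and paren_is_open[2]:
--             paren_is_open[2] = False
--         else: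
--             continue
--
--     return paren_is_open
-- ===== SOURCE B (Python) =====
-- def check_three_quotes(stripped_line, quote, quote_open):
--     """O(n) rewrite: hoisted hash/assign guard, one bitmask paren scan, one counting pass."""
--     if not stripped_line:
--         return -1
--     if not quote_open and ('#' in stripped_line or '=' in stripped_line):
--         return 0
--
--     mask = 0  # bit 1: (), bit 2: {}, bit 4: []
--     for c in stripped_line:
--         if c == '(' and not quote_open:
--             mask |= 1
--         elif c == ')':
--             mask -= mask & 1
--         elif c == '{' and not quote_open:
--             mask |= 2
--         elif c == '}':
--             mask -= mask & 2
--         elif c == '[' and not quote_open: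
--             mask |= 4
--         elif c == ']':
--             mask -= mask & 4
--     if mask != 0:
--         return 0
--
--     if quote == '"':
--         cq, other = '"', "'"
--     elif quote == "'":
--         cq, other = "'", '"'
--     else:
--         return 0
--
--     oc, cc = 0, 0
--     for c in stripped_line:
--         if c == cq:
--             if oc < 3 and cc < 3:
--                 oc += 1
--             elif oc == 3:
--                 cc += 1
--         elif c != other:
--             if oc != 3:
--                 oc = 0
--             if cc != 3:
--                 cc = 0
--     if oc == 3 and cc == 3:
--         return 2
--     if oc == 3:
--         return 1
--     return 0
-- ===== Notes on version B (the rewrite author's own statement) =====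
-- stated objective: faster
-- what changed: A rescans the whole line inside the per-char loop (check_paren) and threads six pieces of loop state with early returns; B is three independent linear passes: a hoisted membership test for '#'/'=', one bitmask scan for the paren fixed point, and one pair-fold that counts open/close quotes.
import Mathlib
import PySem

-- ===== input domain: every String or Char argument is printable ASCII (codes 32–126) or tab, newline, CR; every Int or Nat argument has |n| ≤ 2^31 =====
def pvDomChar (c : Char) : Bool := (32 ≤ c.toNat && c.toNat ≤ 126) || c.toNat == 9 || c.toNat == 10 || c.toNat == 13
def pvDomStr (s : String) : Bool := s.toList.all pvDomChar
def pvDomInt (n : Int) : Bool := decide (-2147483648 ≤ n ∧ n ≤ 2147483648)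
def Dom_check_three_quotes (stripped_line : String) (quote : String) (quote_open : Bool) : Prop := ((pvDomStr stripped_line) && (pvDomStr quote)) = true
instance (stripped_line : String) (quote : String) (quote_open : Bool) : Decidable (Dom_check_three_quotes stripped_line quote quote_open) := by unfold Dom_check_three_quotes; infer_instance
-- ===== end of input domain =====

-- B replaces A's per-character rescan of the whole line (check_paren) and its six-field loop
-- state by three independent linear passes (membership guard, bitmask paren scan, pair-fold
-- count): O(n) instead of O(n^2). Return value only.

-- ===== PORT A =====
-- one elif chain of check_paren, for one character
def cpStep (q1 q2 : Bool) (p : Bool × Bool × Bool) (c : Char) : Bool × Bool × Bool :=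
  if c = '(' ∧ ¬ p.1 ∧ ¬ q1 ∧ ¬ q2 then (true, p.2.1, p.2.2)
  else if c = ')' ∧ p.1 then (false, p.2.1, p.2.2)
  else if c = '{' ∧ ¬ p.2.1 ∧ ¬ q1 ∧ ¬ q2 then (p.1, true, p.2.2)
  else if c = '}' ∧ p.2.1 then (p.1, false, p.2.2)
  else if c = '[' ∧ ¬ p.2.2 ∧ ¬ q1 ∧ ¬ q2 then (p.1, p.2.1, true)
  else if c = ']' ∧ p.2.2 then (p.1, p.2.1, false)
  else p

def check_paren (line : List Char) (p : Bool × Bool × Bool) (q1 q2 : Bool) : Bool × Bool × Bool :=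
  line.foldl (cpStep q1 q2) p

-- A's main loop; state = (stack_open, stack_close, is_encase_open, encase_stack, paren_is_open)
def loopA (line : List Char) (cq eq : Option Char) (qo : Bool) :
    List Char → List Char → List Char → Bool → Int → (Bool × Bool × Bool) → Int
  | [], so, sc, _, _, _ =>
    if so.length = 3 ∧ sc.length = 3 then 2 else if so.length = 3 then 1 else 0
  | c :: rest, so, sc, isEnc, encSt, paren =>
    if c = '#' ∧ ¬ qo then 0
    else if c = '=' ∧ ¬ qo then 0
    else
      let p := check_paren line paren qo qo
      if ¬ p.1 ∧ ¬ p.2.1 ∧ ¬ p.2.2 then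
        if some c = cq then
          if so.length < 3 ∧ sc.length < 3 then loopA line cq eq qo rest (so ++ [c]) sc isEnc encSt p
          else if so.length = 3 then loopA line cq eq qo rest so (sc ++ [c]) isEnc encSt p
          else loopA line cq eq qo rest so sc isEnc encSt p
        else if some c = eq then
          if ¬ isEnc then loopA line cq eq qo rest so sc true (encSt + 1) p
          else
            if encSt + 1 > 2 then loopA line cq eq qo rest so sc false 0 p
            else loopA line cq eq qo rest so sc true (encSt + 1) p
        else
          loopA line cq eq qo rest (if so.length ≠ 3 then [] else so)
            (if sc.length ≠ 3 then [] else sc) isEnc encSt p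
      else loopA line cq eq qo rest so sc isEnc encSt p

def check_three_quotes (stripped_line : String) (quote : String) (quote_open : Bool) : Int :=
  if stripped_line.toList = [] then -1
  else
    let cq : Option Char := if quote = "\"" then some '"' else if quote = "'" then some '\'' else none
    let eq : Option Char := if quote = "\"" then some '\'' else if quote = "'" then some '"' else none
    loopA stripped_line.toList cq eq quote_open stripped_line.toList [] [] false 0 (false, false, false)

-- ===== PORT B =====
-- one step of B's bitmask paren scan (bit 1: (), bit 2: {}, bit 4: [])
def maskStep (quote_open : Bool) (m : Nat) (c : Char) : Nat :=
  if c = '(' ∧ ¬ quote_open then m ||| 1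
  else if c = ')' then m - (m &&& 1)
  else if c = '{' ∧ ¬ quote_open then m ||| 2
  else if c = '}' then m - (m &&& 2)
  else if c = '[' ∧ ¬ quote_open then m ||| 4
  else if c = ']' then m - (m &&& 4)
  else m

-- one step of B's counting pass over the pair (oc, cc)
def countStep (cq other : Char) (s : Int × Int) (c : Char) : Int × Int :=
  if c = cq then
    if s.1 < 3 ∧ s.2 < 3 then (s.1 + 1, s.2)
    else if s.1 = 3 then (s.1, s.2 + 1)
    else s
  else if c = other then s
  else ((if s.1 ≠ 3 then 0 else s.1), (if s.2 ≠ 3 then 0 else s.2))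

-- B's counting pass plus the final classification
def finishCount (cq other : Char) (cs : List Char) : Int :=
  let s := cs.foldl (countStep cq other) (0, 0)
  if s.1 = 3 ∧ s.2 = 3 then 2 else if s.1 = 3 then 1 else 0

def check_three_quotes_alt (stripped_line : String) (quote : String) (quote_open : Bool) : Int :=
  if stripped_line.toList = [] then -1
  else if ¬ quote_open ∧ ('#' ∈ stripped_line.toList ∨ '=' ∈ stripped_line.toList) then 0
  else if stripped_line.toList.foldl (maskStep quote_open) 0 ≠ 0 then 0
  else if quote = "\"" then finishCount '"' '\'' stripped_line.toList
  else if quote = "'" then finishCount '\'' '"' stripped_line.toList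
  else 0

-- ===== PRECONDITION & SPEC =====
def Spec_check_three_quotes (stripped_line : String) (quote : String) (quote_open : Bool) (out : Int) : Prop := out = check_three_quotes_alt stripped_line quote quote_open
instance (stripped_line : String) (quote : String) (quote_open : Bool) (out : Int) : Decidable (Spec_check_three_quotes stripped_line quote quote_open out) := by unfold Spec_check_three_quotes; infer_instance

-- ===== CLAIM (what is proved, stated in full; the proofs are below) =====
def Claim_equal_check_three_quotes : Prop := ∀ (stripped_line : String) (quote : String) (quote_open : Bool), Dom_check_three_quotes stripped_line quote quote_open → Spec_check_three_quotes stripped_line quote quote_open (check_three_quotes stripped_line quote quote_open)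

-- ===== LEMMAS AND PROOFS =====

-- encode A's Bool-triple paren state as B's bitmask
def encP (p : Bool × Bool × Bool) : Nat :=
  (cond p.1 1 0) + (cond p.2.1 2 0) + (cond p.2.2 4 0)

theorem maskStep_enc (qo : Bool) (p : Bool × Bool × Bool) (c : Char) :
    maskStep qo (encP p) c = encP (cpStep qo qo p c) := by
  rcases p with ⟨a, b, d⟩
  by_cases h1 : c = '('
  · subst h1; revert qo a b d; decide
  by_cases h2 : c = ')'
  · subst h2; revert qo a b d; decide
  by_cases h3 : c = '{'
  · subst h3; revert qo a b d; decide
  by_cases h4 : c = '}'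
  · subst h4; revert qo a b d; decide
  by_cases h5 : c = '['
  · subst h5; revert qo a b d; decide
  by_cases h6 : c = ']'
  · subst h6; revert qo a b d; decide
  simp [maskStep, cpStep, encP, h1, h2, h3, h4, h5, h6]

theorem maskFold_enc (qo : Bool) (cs : List Char) :
    ∀ p : Bool × Bool × Bool,
      cs.foldl (maskStep qo) (encP p) = encP (check_paren cs p qo qo) := by
  induction cs with
  | nil => intro p; rfl
  | cons c cs ih =>
    intro p
    show List.foldl (maskStep qo) (maskStep qo (encP p) c) cs = _
    rw [maskStep_enc]
    exact ih (cpStep qo qo p c)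

theorem encP_eq_zero (p : Bool × Bool × Bool) : encP p = 0 ↔ p = (false, false, false) := by
  rcases p with ⟨a, b, d⟩; cases a <;> cases b <;> cases d <;> simp [encP]

-- generic: a fold whose every step is constant-or-identity is itself constant-or-identity
theorem foldl_const_or_id {α β : Type} (step : α → β → α)
    (h : ∀ c, (∀ x y, step x c = step y c) ∨ (∀ x, step x c = x)) :
    ∀ cs : List β, (∀ x y, List.foldl step x cs = List.foldl step y cs) ∨
      (∀ x, List.foldl step x cs = x) := by
  intro cs
  induction cs with
  | nil => right; intro x; rfl
  | cons c cs ih =>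
    rcases h c with hc | hc
    · left; intro x y; simp only [List.foldl_cons, hc x y]
    · rcases ih with hi | hi
      · left; intro x y; simp only [List.foldl_cons]; exact hi _ _
      · right; intro x; simp only [List.foldl_cons, hc x]; exact hi x

theorem idem_of_const_or_id {α β : Type} (step : α → β → α)
    (h : ∀ c, (∀ x y, step x c = step y c) ∨ (∀ x, step x c = x))
    (cs : List β) (x : α) :
    List.foldl step (List.foldl step x cs) cs = List.foldl step x cs := by
  rcases foldl_const_or_id step h cs with hc | hc
  · exact hc _ _
  · exact hc _

-- componentwise step functions of check_paren
def step0 (q1 q2 : Bool) (b : Bool) (c : Char) : Bool :=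
  if c = '(' ∧ ¬ b ∧ ¬ q1 ∧ ¬ q2 then true else if c = ')' ∧ b then false else b
def step1 (q1 q2 : Bool) (b : Bool) (c : Char) : Bool :=
  if c = '{' ∧ ¬ b ∧ ¬ q1 ∧ ¬ q2 then true else if c = '}' ∧ b then false else b
def step2 (q1 q2 : Bool) (b : Bool) (c : Char) : Bool :=
  if c = '[' ∧ ¬ b ∧ ¬ q1 ∧ ¬ q2 then true else if c = ']' ∧ b then false else b

theorem cpStep_decomp (q1 q2 : Bool) (p : Bool × Bool × Bool) (c : Char) :
    cpStep q1 q2 p c = (step0 q1 q2 p.1 c, step1 q1 q2 p.2.1 c, step2 q1 q2 p.2.2 c) := by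
  rcases p with ⟨a, b, d⟩
  simp only [cpStep, step0, step1, step2]
  split_ifs <;> simp_all

theorem step0_const_or_id (q1 q2 : Bool) (c : Char) :
    (∀ x y, step0 q1 q2 x c = step0 q1 q2 y c) ∨ (∀ x, step0 q1 q2 x c = x) := by
  by_cases h : c = '(' ∧ ¬ q1 ∧ ¬ q2
  · left; intro x y; cases x <;> cases y <;> simp [step0, h.1, h.2.1, h.2.2] <;> simp_all
  · by_cases h' : c = ')'
    · left; intro x y; cases x <;> cases y <;> simp_all [step0]
    · right; intro x; cases x <;> simp [step0, h'] <;> simp_all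

theorem step1_const_or_id (q1 q2 : Bool) (c : Char) :
    (∀ x y, step1 q1 q2 x c = step1 q1 q2 y c) ∨ (∀ x, step1 q1 q2 x c = x) := by
  by_cases h : c = '{' ∧ ¬ q1 ∧ ¬ q2
  · left; intro x y; cases x <;> cases y <;> simp [step1, h.1, h.2.1, h.2.2] <;> simp_all
  · by_cases h' : c = '}'
    · left; intro x y; cases x <;> cases y <;> simp_all [step1]
    · right; intro x; cases x <;> simp [step1, h'] <;> simp_all

theorem step2_const_or_id (q1 q2 : Bool) (c : Char) :
    (∀ x y, step2 q1 q2 x c = step2 q1 q2 y c) ∨ (∀ x, step2 q1 q2 x c = x) := by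
  by_cases h : c = '[' ∧ ¬ q1 ∧ ¬ q2
  · left; intro x y; cases x <;> cases y <;> simp [step2, h.1, h.2.1, h.2.2] <;> simp_all
  · by_cases h' : c = ']'
    · left; intro x y; cases x <;> cases y <;> simp_all [step2]
    · right; intro x; cases x <;> simp [step2, h'] <;> simp_all

-- check_paren acts componentwise
theorem cp_decomp (line : List Char) (q1 q2 : Bool) :
    ∀ a b d : Bool, check_paren line (a, b, d) q1 q2 =
      (line.foldl (step0 q1 q2) a, line.foldl (step1 q1 q2) b, line.foldl (step2 q1 q2) d) := by
  induction line with
  | nil => intro a b d; rfl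
  | cons c cs ih =>
    intro a b d
    show List.foldl (cpStep q1 q2) (cpStep q1 q2 (a, b, d) c) cs = _
    rw [cpStep_decomp]
    simp only [List.foldl_cons]
    exact ih _ _ _

-- fixed point: applying check_paren twice is the same as once
theorem cp_fix (line : List Char) (p : Bool × Bool × Bool) (q1 q2 : Bool) :
    check_paren line (check_paren line p q1 q2) q1 q2 = check_paren line p q1 q2 := by
  rcases p with ⟨a, b, d⟩
  rw [cp_decomp, cp_decomp]
  exact Prod.ext (idem_of_const_or_id _ (step0_const_or_id q1 q2) line a)
    (Prod.ext (idem_of_const_or_id _ (step1_const_or_id q1 q2) line b)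
      (idem_of_const_or_id _ (step2_const_or_id q1 q2) line d))

-- if the line contains '#' or '=' and quote_open is false, A's loop returns 0
set_option maxHeartbeats 1000000 in
theorem loopA_of_hazard (line : List Char) (cq eq : Option Char) :
    ∀ (rest : List Char), ('#' ∈ rest ∨ '=' ∈ rest) →
      ∀ (so sc : List Char) (e : Bool) (n : Int) (paren : Bool × Bool × Bool),
        loopA line cq eq false rest so sc e n paren = 0 := by
  intro rest
  induction rest with
  | nil => intro h; simp at h
  | cons c rest ih =>
    intro h so sc e n paren
    by_cases hc : c = '#' ∨ c = '='
    · rcases hc with hc | hc <;> simp [loopA, hc]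
    · push_neg at hc
      have h' : '#' ∈ rest ∨ '=' ∈ rest := by
        rcases h with h | h <;> simp [List.mem_cons] at h <;> tauto
      simp only [loopA]
      split_ifs <;> first | tauto | exact ih h' _ _ _ _ _

-- with no compare/encase quote (quote is neither " nor '), A's loop keeps empty stacks and returns 0
theorem loopA_none (line : List Char) (qo : Bool) :
    ∀ (rest : List Char) (e : Bool) (n : Int) (paren : Bool × Bool × Bool),
      loopA line none none qo rest [] [] e n paren = 0 := by
  intro rest
  induction rest with
  | nil => intro e n paren; simp [loopA]
  | cons c rest ih =>
    intro e n paren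
    simp only [loopA, reduceCtorEq, if_false, List.length_nil, ite_self]
    split_ifs <;> first | rfl | exact ih _ _ _

-- if the paren fixed point has an open parenthesis, A's loop keeps empty stacks and returns 0
theorem loopA_paren_open (line : List Char) (cq eq : Option Char) (qo : Bool)
    (p1 : Bool × Bool × Bool) (hfix : check_paren line p1 qo qo = p1)
    (hp : ¬ (¬ p1.1 ∧ ¬ p1.2.1 ∧ ¬ p1.2.2)) :
    ∀ (rest : List Char) (e : Bool) (n : Int) (paren : Bool × Bool × Bool),
      check_paren line paren qo qo = p1 →
      loopA line cq eq qo rest [] [] e n paren = 0 := by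
  intro rest
  induction rest with
  | nil => intro e n paren _; simp [loopA]
  | cons c rest ih =>
    intro e n paren hparen
    simp only [loopA, hparen]
    split_ifs <;> first | rfl | tauto | exact ih _ _ _ hfix

-- B's final classification of the counter pair (proof-side abbreviation of finishCount's tail)
def finClass (s : Int × Int) : Int :=
  if s.1 = 3 ∧ s.2 = 3 then 2 else if s.1 = 3 then 1 else 0

theorem finishCount_eq (cq other : Char) (cs : List Char) :
    finishCount cq other cs = finClass (cs.foldl (countStep cq other) (0, 0)) := rfl

-- evaluation lemmas for one countStep
theorem countStep_cq_lt (cq eq : Char) (a b : Int) (h : a < 3 ∧ b < 3) :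
    countStep cq eq (a, b) cq = (a + 1, b) := by
  unfold countStep; rw [if_pos rfl, if_pos h]

theorem countStep_cq_full (cq eq : Char) (a b : Int) (hlt : ¬ (a < 3 ∧ b < 3)) (h3 : a = 3) :
    countStep cq eq (a, b) cq = (a, b + 1) := by
  unfold countStep; rw [if_pos rfl, if_neg hlt, if_pos h3]

theorem countStep_cq_stuck (cq eq : Char) (a b : Int) (hlt : ¬ (a < 3 ∧ b < 3)) (h3 : ¬ a = 3) :
    countStep cq eq (a, b) cq = (a, b) := by
  unfold countStep; rw [if_pos rfl, if_neg hlt, if_neg h3]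

theorem countStep_encase (cq eq : Char) (a b : Int) (c : Char) (hc : ¬ c = cq) (he : c = eq) :
    countStep cq eq (a, b) c = (a, b) := by
  unfold countStep; rw [if_neg hc, if_pos he]

theorem countStep_other (cq eq : Char) (a b : Int) (c : Char) (hc : ¬ c = cq) (he : ¬ c = eq) :
    countStep cq eq (a, b) c = ((if a ≠ 3 then 0 else a), (if b ≠ 3 then 0 else b)) := by
  unfold countStep; rw [if_neg hc, if_neg he]

-- main counting agreement: with the paren fixed point all-closed and no '#'/'=' hazard,
-- A's stack loop equals B's pair-fold, the stack lengths tracked by the counters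
set_option maxHeartbeats 1000000 in
theorem loopA_count (line : List Char) (cq eq : Char) (qo : Bool)
    (p1 : Bool × Bool × Bool) (hfix : check_paren line p1 qo qo = p1)
    (hp : ¬ p1.1 ∧ ¬ p1.2.1 ∧ ¬ p1.2.2) :
    ∀ (rest so sc : List Char) (e : Bool) (n : Int) (paren : Bool × Bool × Bool),
      check_paren line paren qo qo = p1 →
      (qo = false → '#' ∉ rest ∧ '=' ∉ rest) →
      loopA line (some cq) (some eq) qo rest so sc e n paren =
        finClass (rest.foldl (countStep cq eq) ((so.length : Int), (sc.length : Int))) := by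
  intro rest
  induction rest with
  | nil =>
    intro so sc e n paren _ _
    simp only [loopA, List.foldl, finClass]
    split_ifs <;> first | rfl | omega
  | cons c rest ih =>
    intro so sc e n paren hparen hh
    have hh' : qo = false → '#' ∉ rest ∧ '=' ∉ rest := fun h =>
      ⟨fun hm => (hh h).1 (List.mem_cons_of_mem _ hm),
       fun hm => (hh h).2 (List.mem_cons_of_mem _ hm)⟩
    have h1 : ¬ (c = '#' ∧ ¬ qo = true) := by
      rintro ⟨rfl, hq⟩
      cases qo
      · exact (hh rfl).1 List.mem_cons_self
      · simp at hq
    have h2 : ¬ (c = '=' ∧ ¬ qo = true) := by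
      rintro ⟨rfl, hq⟩
      cases qo
      · exact (hh rfl).2 List.mem_cons_self
      · simp at hq
    simp only [loopA, hparen, if_neg h1, if_neg h2, if_pos hp, List.foldl_cons,
      Option.some.injEq]
    by_cases hc : c = cq
    · rw [if_pos hc]
      subst hc
      by_cases hlt : so.length < 3 ∧ sc.length < 3
      · rw [if_pos hlt, ih _ _ _ _ _ hfix hh',
          countStep_cq_lt _ _ _ _ (by constructor <;> [exact_mod_cast hlt.1; exact_mod_cast hlt.2])]
        simp only [Prod.mk.injEq, List.length_append, List.length_cons, List.length_nil]
        push_cast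
        omega
      · rw [if_neg hlt]
        have hlt' : ¬ ((so.length : Int) < 3 ∧ (sc.length : Int) < 3) := by
          intro h; exact hlt ⟨by exact_mod_cast h.1, by exact_mod_cast h.2⟩
        by_cases h3 : so.length = 3
        · rw [if_pos h3, ih _ _ _ _ _ hfix hh',
            countStep_cq_full _ _ _ _ hlt' (by exact_mod_cast h3)]
          simp only [Prod.mk.injEq, List.length_append, List.length_cons, List.length_nil]
          push_cast
          omega
        · rw [if_neg h3, ih _ _ _ _ _ hfix hh',
            countStep_cq_stuck _ _ _ _ hlt' (by intro h; exact h3 (by exact_mod_cast h))]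
    · rw [if_neg hc]
      by_cases he : c = eq
      · rw [if_pos he, countStep_encase _ _ _ _ _ hc he]
        split_ifs <;> exact ih _ _ _ _ _ hfix hh'
      · rw [if_neg he, ih _ _ _ _ _ hfix hh', countStep_other _ _ _ _ _ hc he]
        congr 2 <;> split_ifs <;> simp_all <;> omega

-- ===== VERDICT (by name: the statement is the Claim_ definition above) =====
set_option maxHeartbeats 1000000 in
theorem check_three_quotes_spec : Claim_equal_check_three_quotes := by
  unfold Claim_equal_check_three_quotes Spec_check_three_quotes
  intro s q qo _
  unfold check_three_quotes check_three_quotes_alt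
  by_cases hs : s.toList = []
  · simp [hs]
  · simp only [hs, if_false]
    by_cases hH : ¬ qo = true ∧ ('#' ∈ s.toList ∨ '=' ∈ s.toList)
    · rw [if_pos hH]
      have hqo : qo = false := by revert hH; cases qo <;> simp
      subst hqo
      exact loopA_of_hazard _ _ _ _ hH.2 _ _ _ _ _
    · rw [if_neg hH]
      have hmask : s.toList.foldl (maskStep qo) 0 =
          encP (check_paren s.toList (false, false, false) qo qo) := by
        have h0 : (0 : Nat) = encP (false, false, false) := rfl
        rw [h0, maskFold_enc]
      set p1 := check_paren s.toList (false, false, false) qo qo with hp1def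
      have hfix : check_paren s.toList p1 qo qo = p1 := cp_fix _ _ _ _
      by_cases hz : encP p1 = 0
      · have hp1 : p1 = (false, false, false) := (encP_eq_zero p1).mp hz
        have hm0 : s.toList.foldl (maskStep qo) 0 = 0 := by rw [hmask, hz]
        have hh : qo = false → '#' ∉ s.toList ∧ '=' ∉ s.toList := by
          intro h
          subst h
          constructor <;> intro hm <;> exact hH ⟨by simp, by tauto⟩
        simp only [hm0, ne_eq, not_true_eq_false, if_false, reduceIte]
        by_cases hq1 : q = "\""
        · subst hq1
          simp only [String.reduceEq, reduceIte]
          rw [loopA_count s.toList '"' '\'' qo p1 hfix (by rw [hp1]; simp) s.toList [] [] false 0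
              (false, false, false) (by rw [← hp1def]) hh, finishCount_eq]
          rfl
        · by_cases hq2 : q = "'"
          · subst hq2
            simp only [String.reduceEq, reduceIte]
            rw [loopA_count s.toList '\'' '"' qo p1 hfix (by rw [hp1]; simp) s.toList [] [] false 0
                (false, false, false) (by rw [← hp1def]) hh, finishCount_eq]
            rfl
          · simp only [if_neg hq1, if_neg hq2]
            exact loopA_none _ _ _ _ _ _
      · have hm0 : s.toList.foldl (maskStep qo) 0 ≠ 0 := by rw [hmask]; exact hz
        simp only [hm0, ne_eq, not_false_eq_true, if_true, reduceIte]
        have hp : ¬ (¬ p1.1 ∧ ¬ p1.2.1 ∧ ¬ p1.2.2) := by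
          intro h
          apply hz
          rw [(encP_eq_zero p1).mpr]
          rcases p1 with ⟨a, b, d⟩
          simp_all
        exact loopA_paren_open s.toList _ _ qo p1 hfix hp s.toList false 0 _ (by rw [← hp1def])
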